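-- pv_equiv track=rewrite | github.com/sueszli/vector-database-benchmark | dataset/python-mutated/test_modeling_tf_common.py | _check_match_tokens
-- ===== SOURCE A (Python) =====
-- def _check_match_tokens(generated_ids, bad_words_ids):
--     if False:
--         while True:
--             i = 10
--     for bad_word_ids in bad_words_ids:
--         for generated_ids_slice in generated_ids:
--             for i in range(len(bad_word_ids), len(generated_ids_slice)):
--                 if generated_ids_slice[i - len(bad_word_ids):i] == bad_word_ids:
--                     return True
--     return False
-- ===== SOURCE B (Python) =====
-- def _check_match_tokens(generated_ids, bad_words_ids):
--     """True iff some bad-word sequence occurs in a generated sequence,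
--     ending strictly before that sequence's last position."""
--     by_len = {}
--     for bad in bad_words_ids:
--         by_len.setdefault(len(bad), set()).add(tuple(bad))
--     for seq in generated_ids:
--         for k, pats in by_len.items():
--             for j in range(len(seq) - k):
--                 if tuple(seq[j:j + k]) in pats:
--                     return True
--     return False
-- ===== Notes on version B (the rewrite author's own statement) =====
-- stated objective: faster
-- what changed: A scans every (bad word, sequence) pair comparing a fresh slice per window; B first builds a hash index (dict: length -> set of bad-word tuples) in one pass over the bad words, then per sequence does one sliding scan per DISTINCT bad-word length with an O(1) set-membership test, so the per-bad-word inner scan disappears.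
import Mathlib
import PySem

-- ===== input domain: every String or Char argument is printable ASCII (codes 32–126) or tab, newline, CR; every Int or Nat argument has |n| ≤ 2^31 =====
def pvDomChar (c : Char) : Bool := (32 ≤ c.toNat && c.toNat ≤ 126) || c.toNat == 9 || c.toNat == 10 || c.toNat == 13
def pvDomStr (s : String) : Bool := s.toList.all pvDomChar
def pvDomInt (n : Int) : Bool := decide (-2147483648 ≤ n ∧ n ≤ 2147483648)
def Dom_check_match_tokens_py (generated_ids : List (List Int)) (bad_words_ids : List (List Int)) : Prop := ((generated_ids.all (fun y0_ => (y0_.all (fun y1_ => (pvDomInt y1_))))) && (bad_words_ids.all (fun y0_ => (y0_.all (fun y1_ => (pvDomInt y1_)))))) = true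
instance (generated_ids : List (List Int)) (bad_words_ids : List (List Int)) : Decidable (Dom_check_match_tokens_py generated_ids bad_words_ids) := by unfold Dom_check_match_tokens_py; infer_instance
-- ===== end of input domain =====

-- B indexes the bad words by length into a dict of hash sets once, then per sequence runs
-- one sliding membership scan per distinct length (objective: faster; measured).

-- ===== PORT A =====
-- for bad_word_ids in bad_words_ids: for slice in generated_ids:
--   for i in range(len(bad_word_ids), len(slice)): if slice[i-len(bad):i] == bad: return True
def check_match_tokens_py (generated_ids : List (List Int)) (bad_words_ids : List (List Int)) : Bool :=
  bad_words_ids.any (fun bad_word_ids =>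
    generated_ids.any (fun generated_ids_slice =>
      (PySem.List.pyRange (bad_word_ids.length : Int) (generated_ids_slice.length : Int) 1).any
        (fun i =>
          PySem.List.slice generated_ids_slice (some (i - (bad_word_ids.length : Int))) (some i)
            == bad_word_ids)))

-- ===== PORT B =====
-- by_len = {}; for bad in bad_words_ids: by_len.setdefault(len(bad), set()).add(tuple(bad))
-- for seq in generated_ids: for k, pats in by_len.items():
--   for j in range(len(seq) - k): if tuple(seq[j:j+k]) in pats: return True
def check_match_tokens_py_alt (generated_ids : List (List Int)) (bad_words_ids : List (List Int)) : Bool :=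
  let by_len : PySem.Dict Int (PySem.Set (List Int)) :=
    bad_words_ids.foldl
      (fun d bad => d.modify (bad.length : Int) PySem.Set.empty (fun s => PySem.Set.add s bad))
      PySem.Dict.empty
  generated_ids.any (fun seq =>
    by_len.items.any (fun kp =>
      (PySem.List.pyRange 0 ((seq.length : Int) - kp.1) 1).any (fun j =>
        PySem.Set.contains kp.2 (PySem.List.slice seq (some j) (some (j + kp.1))))))

-- ===== PRECONDITION & SPEC =====
def Spec_check_match_tokens_py (generated_ids : List (List Int)) (bad_words_ids : List (List Int)) (out : Bool) : Prop := out = check_match_tokens_py_alt generated_ids bad_words_ids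
instance (generated_ids : List (List Int)) (bad_words_ids : List (List Int)) (out : Bool) : Decidable (Spec_check_match_tokens_py generated_ids bad_words_ids out) := by unfold Spec_check_match_tokens_py; infer_instance

-- ===== CLAIM =====
def Claim_equal_check_match_tokens_py : Prop := ∀ (generated_ids : List (List Int)) (bad_words_ids : List (List Int)), Dom_check_match_tokens_py generated_ids bad_words_ids → Spec_check_match_tokens_py generated_ids bad_words_ids (check_match_tokens_py generated_ids bad_words_ids)

-- ===== LEMMAS AND PROOFS =====

-- A's inner index loop hits exactly the windows of length k ending strictly before the end.
theorem aInner_iff (bad s : List Int) :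
    ((PySem.List.pyRange (bad.length : Int) (s.length : Int) 1).any
      (fun i => PySem.List.slice s (some (i - (bad.length : Int))) (some i) == bad)) = true ↔
    ∃ m : Nat, bad.length ≤ m ∧ m < s.length ∧ (s.drop (m - bad.length)).take bad.length = bad := by
  rw [List.any_eq_true]
  constructor
  · rintro ⟨i, hmem, hslice⟩
    rw [PySem.List.mem_pyRange_one] at hmem
    obtain ⟨h1, h2⟩ := hmem
    have hi0 : 0 ≤ i := le_trans (Int.natCast_nonneg _) h1
    refine ⟨i.toNat, by omega, by omega, ?_⟩
    rw [PySem.List.slice_toNat s (show (0:Int) ≤ i - (bad.length : Int) by omega)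
      (show (0:Int) ≤ i by omega), beq_iff_eq] at hslice
    have : (i - (bad.length : Int)).toNat = i.toNat - bad.length := by omega
    rw [this] at hslice
    have hk : i.toNat - (i.toNat - bad.length) = bad.length := by omega
    rwa [hk] at hslice
  · rintro ⟨m, h1, h2, h3⟩
    refine ⟨(m : Int), ?_, ?_⟩
    · rw [PySem.List.mem_pyRange_one]; omega
    · rw [PySem.List.slice_toNat s (show (0:Int) ≤ (m:Int) - (bad.length : Int) by omega)
        (show (0:Int) ≤ (m:Int) by omega), beq_iff_eq]
      have : ((m : Int) - (bad.length : Int)).toNat = m - bad.length := by omega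
      rw [this]
      have hk : (m : Int).toNat - (m - bad.length) = bad.length := by omega
      rwa [hk]

-- members of the length-k bucket of the index built by B's first loop
theorem getD_buildIndex_mem (l : List (List Int)) (d : PySem.Dict Int (PySem.Set (List Int)))
    (k : Int) (t : List Int) :
    t ∈ (l.foldl
        (fun d bad => d.modify (bad.length : Int) PySem.Set.empty (fun s => PySem.Set.add s bad))
        d).getD k PySem.Set.empty ↔
    t ∈ d.getD k PySem.Set.empty ∨ ∃ bad ∈ l, (bad.length : Int) = k ∧ bad = t := by
  induction l generalizing d with
  | nil => simp
  | cons x l ih =>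
    rw [List.foldl_cons, ih, PySem.Dict.getD_modify]
    split_ifs with hke
    · subst hke
      rw [PySem.Set.mem_add]
      simp only [List.mem_cons]
      constructor
      · rintro ((h | rfl) | ⟨bad, hb, h1, h2⟩)
        · exact Or.inl h
        · exact Or.inr ⟨t, Or.inl rfl, rfl, rfl⟩
        · exact Or.inr ⟨bad, Or.inr hb, h1, h2⟩
      · rintro (h | ⟨bad, hb | hb, h1, h2⟩)
        · exact Or.inl (Or.inl h)
        · subst hb; subst h2; exact Or.inl (Or.inr rfl)
        · exact Or.inr ⟨bad, hb, h1, h2⟩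
    · simp only [List.mem_cons]
      constructor
      · rintro (h | ⟨bad, hb, h1, h2⟩)
        · exact Or.inl h
        · exact Or.inr ⟨bad, Or.inr hb, h1, h2⟩
      · rintro (h | ⟨bad, hb | hb, h1, h2⟩)
        · exact Or.inl h
        · exact absurd (hb ▸ h1) (fun h' => hke h'.symm)
        · exact Or.inr ⟨bad, hb, h1, h2⟩

-- the keys of B's index are unique (so items ↔ get?)
theorem nodup_keys_buildIndex (l : List (List Int)) :
    (l.foldl
      (fun d bad => d.modify (bad.length : Int) PySem.Set.empty (fun s => PySem.Set.add s bad))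
      PySem.Dict.empty).keys.Nodup :=
  PySem.Dict.nodup_keys_foldl_modify_key l (fun bad => (bad.length : Int))
    PySem.Set.empty (fun _ bad s => PySem.Set.add s bad) PySem.Dict.empty
    PySem.Dict.nodup_keys_empty

-- B's per-(sequence, bucket) scan finds exactly a window of length k (= k ≥ 0)
-- ending strictly before the end that lies in the bucket.
theorem bInner_iff (seq : List Int) (k : Int) (pats : PySem.Set (List Int)) (hk : 0 ≤ k) :
    ((PySem.List.pyRange 0 ((seq.length : Int) - k) 1).any (fun j =>
      PySem.Set.contains pats (PySem.List.slice seq (some j) (some (j + k))))) = true ↔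
    ∃ t ∈ pats, ∃ m : Nat, (t.length : Int) = k ∧ t.length ≤ m ∧ m < seq.length ∧
      (seq.drop (m - t.length)).take t.length = t := by
  rw [List.any_eq_true]
  constructor
  · rintro ⟨j, hmem, hin⟩
    rw [PySem.List.mem_pyRange_one] at hmem
    obtain ⟨hj0, hjb⟩ := hmem
    rw [PySem.Set.contains_iff] at hin
    have hsl : PySem.List.slice seq (some j) (some (j + k)) = (seq.drop j.toNat).take k.toNat := by
      rw [PySem.List.slice_toNat seq hj0 (by omega)]
      congr 1
      omega
    rw [hsl] at hin
    have hlen : ((seq.drop j.toNat).take k.toNat).length = k.toNat := by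
      simp only [List.length_take, List.length_drop]
      omega
    refine ⟨_, hin, j.toNat + k.toNat, ?_, ?_, ?_, ?_⟩
    · rw [hlen]; omega
    · rw [hlen]; omega
    · omega
    · rw [hlen]
      have e : j.toNat + k.toNat - k.toNat = j.toNat := by omega
      rw [e]
  · rintro ⟨t, htp, m, hlk, h1, h2, h3⟩
    refine ⟨((m - t.length : Nat) : Int), ?_, ?_⟩
    · rw [PySem.List.mem_pyRange_one]; omega
    · rw [PySem.Set.contains_iff]
      rw [PySem.List.slice_toNat seq (Int.natCast_nonneg _) (by omega)]
      have e1 : (((m - t.length : Nat) : Int)).toNat = m - t.length := Int.toNat_natCast _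
      rw [e1]
      have e2 : ((((m - t.length : Nat) : Int) + k).toNat - (m - t.length)) = t.length := by omega
      rw [e2, h3]
      exact htp

-- lookup form of a dict whose bucket is inhabited
theorem get?_of_getD_mem (d : PySem.Dict Int (PySem.Set (List Int))) (k : Int) (t : List Int)
    (h : t ∈ d.getD k PySem.Set.empty) : d.get? k = some (d.getD k PySem.Set.empty) := by
  rcases hg : d.get? k with _ | s
  · rw [PySem.Dict.getD_eq_get?_getD, hg] at h
    simp [PySem.Set.empty] at h
  · simp [PySem.Dict.getD_eq_get?_getD, hg]

-- ===== VERDICT =====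
theorem check_match_tokens_py_spec : Claim_equal_check_match_tokens_py := by
  intro generated_ids bad_words_ids _
  unfold Spec_check_match_tokens_py check_match_tokens_py check_match_tokens_py_alt
  rw [Bool.eq_iff_iff, List.any_eq_true, List.any_eq_true]
  set D := bad_words_ids.foldl
    (fun d bad => d.modify (bad.length : Int) PySem.Set.empty (fun s => PySem.Set.add s bad))
    PySem.Dict.empty with hD
  constructor
  · rintro ⟨bad, hbad, hs⟩
    rw [List.any_eq_true] at hs
    obtain ⟨s, hsmem, hp⟩ := hs
    rw [aInner_iff] at hp
    obtain ⟨m, h1, h2, h3⟩ := hp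
    refine ⟨s, hsmem, ?_⟩
    rw [List.any_eq_true]
    have hmem : bad ∈ D.getD (bad.length : Int) PySem.Set.empty := by
      rw [hD, getD_buildIndex_mem]
      exact Or.inr ⟨bad, hbad, rfl, rfl⟩
    have hget := get?_of_getD_mem D (bad.length : Int) bad hmem
    refine ⟨((bad.length : Int), D.getD (bad.length : Int) PySem.Set.empty),
      PySem.Dict.mem_items_of_get?_eq_some D hget, ?_⟩
    rw [bInner_iff s (bad.length : Int) _ (Int.natCast_nonneg _)]
    exact ⟨bad, hmem, m, rfl, h1, h2, h3⟩
  · rintro ⟨s, hsmem, hs⟩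
    rw [List.any_eq_true] at hs
    obtain ⟨⟨k, pats⟩, hkp, hp⟩ := hs
    have hget : D.get? k = some pats :=
      PySem.Dict.get?_of_mem_items D hkp (hD ▸ nodup_keys_buildIndex bad_words_ids)
    -- every member of the bucket is a bad word of length k
    have hbuck : ∀ t ∈ pats, ∃ bad ∈ bad_words_ids, (bad.length : Int) = k ∧ bad = t := by
      intro t ht
      have : t ∈ D.getD k PySem.Set.empty := by
        rw [PySem.Dict.getD_eq_get?_getD, hget]; exact ht
      rw [hD, getD_buildIndex_mem] at this
      rcases this with h | h
      · simp [PySem.Dict.getD_empty, PySem.Set.empty] at h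
      · exact h
    have hknn : 0 ≤ k := by
      rcases hb : pats with _ | ⟨t, ts⟩
      · -- empty bucket: the scan over it cannot succeed
        rw [List.any_eq_true] at hp
        obtain ⟨j, _, hc⟩ := hp
        rw [hb, PySem.Set.contains_iff] at hc
        exact absurd hc (List.not_mem_nil)
      · obtain ⟨bad, _, hlk, _⟩ := hbuck t (by rw [hb]; exact List.mem_cons_self)
        omega
    rw [bInner_iff s k pats hknn] at hp
    obtain ⟨t, htp, m, hlk, h1, h2, h3⟩ := hp
    obtain ⟨bad, hbad, hblk, hbt⟩ := hbuck t htp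
    subst hbt
    refine ⟨bad, hbad, ?_⟩
    rw [List.any_eq_true]
    refine ⟨s, hsmem, ?_⟩
    rw [aInner_iff]
    exact ⟨m, h1, h2, h3⟩
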